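-- pv_equiv track=rewrite | github.com/tsuru7/algorithm-study | seisen100mon/016/A.py | solve
-- ===== SOURCE A (Python) =====
-- from itertools import permutations
--
-- def solve(n,p,q):
--     ans=0
--     for c, x in enumerate(permutations(list(range(1,n+1)))):
--         xl = list(x)
--         if xl == p and xl == q:
--             return 0
--         elif xl == p or xl == q:
--             ans = c - ans
--     return ans
-- ===== SOURCE B (Python) =====
-- def solve(n, p, q):
--     # Lexicographic rank via the factorial number system (Lehmer code)
--     # instead of enumerating permutations; a non-permutation ranks 0, matching A.
--     def fact(k):
--         return 1 if k <= 0 else k * fact(k - 1)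
--
--     def rank(xs):
--         if not xs:
--             return 0
--         c = sum(1 for y in xs[1:] if y < xs[0])
--         return c * fact(len(xs) - 1) + rank(xs[1:])
--
--     def rank0(xs):
--         if sorted(xs) != list(range(1, n + 1)):
--             return 0
--         return rank(xs)
--
--     return abs(rank0(p) - rank0(q))
-- ===== Notes on version B (the rewrite author's own statement) =====
-- stated objective: alternative
-- what changed: Instead of enumerating all n! permutations and tracking the loop counter at matches, B computes the lexicographic rank of p and of q directly via the factorial number system (Lehmer code) and returns the absolute difference, with rank 0 for a list that is not a permutation of 1..n, which reproduces A's behaviour when p or q never matches.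
import Mathlib
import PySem

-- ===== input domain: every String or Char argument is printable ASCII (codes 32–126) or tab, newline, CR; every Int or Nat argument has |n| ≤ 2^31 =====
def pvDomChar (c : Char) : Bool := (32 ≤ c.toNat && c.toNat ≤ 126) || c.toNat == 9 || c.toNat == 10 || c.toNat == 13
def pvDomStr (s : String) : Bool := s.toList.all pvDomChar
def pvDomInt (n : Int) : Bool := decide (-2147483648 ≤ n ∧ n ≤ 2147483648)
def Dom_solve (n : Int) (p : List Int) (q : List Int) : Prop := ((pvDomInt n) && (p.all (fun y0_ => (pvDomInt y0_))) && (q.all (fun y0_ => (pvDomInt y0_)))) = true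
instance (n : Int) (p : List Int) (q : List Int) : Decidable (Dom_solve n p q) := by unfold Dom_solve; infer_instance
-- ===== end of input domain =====

-- B computes each rank by the factorial number system (Lehmer code) instead of walking the list of all n! permutations; return value only, no mutation.

-- ===== PORT A =====
-- the 'for c, x in enumerate(...)' loop with early return, counter c and accumulator ans
def loopA (p q : List Int) : List (List Int) → Int → Int → Int
  | [], _, ans => ans
  | x :: rest, c, ans =>
    if x = p ∧ x = q then 0
    else if x = p ∨ x = q then loopA p q rest (c + 1) (c - ans)
    else loopA p q rest (c + 1) ans

def solve (n : Int) (p : List Int) (q : List Int) : Int :=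
  loopA p q
    (PySem.List.permutations (PySem.List.pyRange 1 (n + 1) 1)
      (PySem.List.pyRange 1 (n + 1) 1).length) 0 0

-- ===== PORT B =====
-- def fact(k): return 1 if k <= 0 else k * fact(k - 1)
def factB (k : Int) : Int :=
  if k ≤ 0 then 1 else k * factB (k - 1)
termination_by k.toNat
decreasing_by omega

-- def rank(xs): head count * fact(len-1) + rank(tail)
def rankB : List Int → Int
  | [] => 0
  | x :: rest => (rest.countP (fun y => decide (y < x)) : Int) * factB (rest.length : Int) + rankB rest

-- def rank0(xs): 0 unless sorted(xs) == list(range(1, n+1))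
def rank0B (n : Int) (xs : List Int) : Int :=
  if PySem.List.sorted xs (fun y => y) false = PySem.List.pyRange 1 (n + 1) 1 then rankB xs else 0

def solve_alt (n : Int) (p : List Int) (q : List Int) : Int :=
  |rank0B n p - rank0B n q|

-- ===== PRECONDITION & SPEC =====
def Spec_solve (n : Int) (p : List Int) (q : List Int) (out : Int) : Prop := out = solve_alt n p q
instance (n : Int) (p : List Int) (q : List Int) (out : Int) : Decidable (Spec_solve n p q out) := by unfold Spec_solve; infer_instance

-- ===== CLAIM (what is proved, stated in full; the proofs are below) =====
def Claim_equal_solve : Prop := ∀ (n : Int) (p : List Int) (q : List Int), Dom_solve n p q → Spec_solve n p q (solve n p q)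

-- ===== LEMMAS AND PROOFS =====

-- position of the first occurrence of x (list length if absent)
def posIn {α : Type} [DecidableEq α] (x : α) : List α → Nat
  | [] => 0
  | y :: l => if y = x then 0 else posIn x l + 1

theorem posIn_lt_length {α : Type} [DecidableEq α] {x : α} {l : List α} (h : x ∈ l) :
    posIn x l < l.length := by
  induction l with
  | nil => simp at h
  | cons a t ih =>
    by_cases hax : a = x
    · simp [posIn, hax]
    · rcases List.mem_cons.mp h with h | h
      · exact absurd h.symm hax
      · simp only [posIn, if_neg hax, List.length_cons]
        exact Nat.succ_lt_succ (ih h)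

theorem posIn_append_of_mem {α : Type} [DecidableEq α] {x : α} {l1 : List α} (l2 : List α)
    (h : x ∈ l1) : posIn x (l1 ++ l2) = posIn x l1 := by
  induction l1 with
  | nil => simp at h
  | cons a t ih =>
    by_cases hax : a = x
    · simp [posIn, hax]
    · rcases List.mem_cons.mp h with h | h
      · exact absurd h.symm hax
      · simp [posIn, hax, ih h]

theorem posIn_append_of_not_mem {α : Type} [DecidableEq α] {x : α} {l1 : List α} (l2 : List α)
    (h : x ∉ l1) : posIn x (l1 ++ l2) = l1.length + posIn x l2 := by
  induction l1 with
  | nil => simp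
  | cons a t ih =>
    have hax : a ≠ x := fun he => h (he ▸ List.mem_cons_self)
    have hxt : x ∉ t := fun hm => h (List.mem_cons_of_mem _ hm)
    simp [posIn, hax, ih hxt]; omega

theorem posIn_map_cons {α : Type} [DecidableEq α] (a : α) (xr : List α) (P : List (List α)) :
    posIn (a :: xr) (P.map (a :: ·)) = posIn xr P := by
  induction P with
  | nil => simp [posIn]
  | cons t T ih =>
    by_cases ht : t = xr
    · simp [posIn, ht]
    · have : ¬(a :: t = a :: xr) := by simp [ht]
      simp [posIn, ht, this, ih]

theorem not_mem_map_cons {α : Type} [DecidableEq α] {b x0 : α} (xr : List α) (P : List (List α))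
    (h : b ≠ x0) : (x0 :: xr) ∉ P.map (b :: ·) := by
  simp only [List.mem_map]
  rintro ⟨t, -, he⟩
  injection he with h1 h2
  exact h h1

theorem getD_posIn {α : Type} [DecidableEq α] {x : α} {l : List α} (d : α) (h : x ∈ l) :
    l.getD (posIn x l) d = x := by
  induction l with
  | nil => simp at h
  | cons a t ih =>
    by_cases hax : a = x
    · simp [posIn, hax]
    · rcases List.mem_cons.mp h with h | h
      · exact absurd h.symm hax
      · simp only [posIn, if_neg hax, List.getD_cons_succ]
        exact ih h

theorem eraseIdx_posIn {α : Type} [DecidableEq α] {x : α} {l : List α} (h : x ∈ l) :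
    l.eraseIdx (posIn x l) = l.erase x := by
  induction l with
  | nil => simp at h
  | cons a t ih =>
    by_cases hax : a = x
    · simp [posIn, hax, List.erase_cons_head]
    · have : ¬(a == x) := by simpa using hax
      rcases List.mem_cons.mp h with h | h
      · exact absurd h.symm hax
      · simp [posIn, hax, this, ih h]

theorem sum_map_const {α : Type} (l : List α) (g : α → Nat) (c : Nat)
    (h : ∀ b ∈ l, g b = c) : (l.map g).sum = l.length * c := by
  induction l with
  | nil => simp
  | cons a t ih =>
    simp only [List.map_cons, List.sum_cons, List.length_cons]
    rw [h a List.mem_cons_self, ih (fun b hb => h b (List.mem_cons_of_mem _ hb))]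
    ring

theorem range_split {n j : Nat} (h : j < n) :
    ∃ M2, List.range n = List.range j ++ j :: M2 := by
  induction n with
  | zero => omega
  | succ m ih =>
    by_cases hj : j < m
    · obtain ⟨M2, hM⟩ := ih hj
      exact ⟨M2 ++ [m], by rw [List.range_succ, hM]; simp⟩
    · have : j = m := by omega
      subst this
      exact ⟨[], by rw [List.range_succ]⟩

theorem posIn_flatMap_append {j0 : Nat} (M1 M2 : List Nat) (f : Nat → List (List Int))
    (g : Nat → Int) (x0 : Int) (xr : List Int)
    (h1 : ∀ i ∈ M1, g i ≠ x0) (hg : g j0 = x0) (hmem : xr ∈ f j0) :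
    posIn (x0 :: xr) ((M1 ++ j0 :: M2).flatMap fun i => (f i).map (g i :: ·)) =
      (M1.map fun i => (f i).length).sum + posIn xr (f j0) := by
  induction M1 with
  | nil =>
    simp only [List.nil_append, List.flatMap_cons, List.map_nil, List.sum_nil, Nat.zero_add]
    rw [posIn_append_of_mem, hg, posIn_map_cons]
    rw [hg]; exact List.mem_map_of_mem hmem
  | cons b T ih =>
    have hb : g b ≠ x0 := h1 b List.mem_cons_self
    simp only [List.cons_append, List.flatMap_cons, List.map_cons, List.sum_cons]
    rw [posIn_append_of_not_mem _ (not_mem_map_cons _ _ hb),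
      ih (fun i hi => h1 i (List.mem_cons_of_mem _ hi)), List.length_map]
    omega

-- unfolding of PySem.List.permutations at successor fuel, with the getElem? match resolved
theorem permutations_succ (xs : List Int) (r : Nat) :
    PySem.List.permutations xs (r + 1) =
      (List.range xs.length).flatMap
        (fun i => (PySem.List.permutations (xs.eraseIdx i) r).map (xs.getD i 0 :: ·)) := by
  rw [PySem.List.permutations.eq_def]
  dsimp only
  rw [List.flatMap_def, List.flatMap_def]
  congr 1
  apply List.map_congr_left
  intro i hi
  have hlt : i < xs.length := List.mem_range.mp hi
  rw [List.getElem?_eq_getElem hlt, List.getD_eq_getElem _ _ hlt]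

theorem mem_permutations_iff {xs : List Int} {r : Nat} (h : xs.length = r) (y : List Int) :
    y ∈ PySem.List.permutations xs r ↔ y.Perm xs := by
  induction r generalizing xs y with
  | zero =>
    have hx : xs = [] := List.length_eq_zero_iff.mp h
    subst hx
    rw [PySem.List.permutations.eq_def]
    simp
  | succ r ih =>
    rw [permutations_succ]
    simp only [List.mem_flatMap, List.mem_range, List.mem_map]
    constructor
    · rintro ⟨i, hi, t, ht, rfl⟩
      have hlen : (xs.eraseIdx i).length = r := by rw [List.length_eraseIdx, if_pos hi]; omega
      have hperm : t.Perm (xs.eraseIdx i) := (ih hlen t).mp ht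
      have := (List.getElem_cons_eraseIdx_perm hi).symm
      rw [List.getD_eq_getElem _ _ hi]
      exact ((hperm.cons (xs[i]'hi)).trans this.symm)
    · intro hy
      match y, hy with
      | [], hy => exact absurd (hy.symm.length_eq) (by simp [h])
      | y0 :: yr, hy =>
        have hy0 : y0 ∈ xs := hy.mem_iff.mp List.mem_cons_self
        have hj : posIn y0 xs < xs.length := posIn_lt_length hy0
        refine ⟨posIn y0 xs, hj, yr, ?_, ?_⟩
        · have hyr : yr.Perm (xs.erase y0) := (List.cons_perm_iff_perm_erase.mp hy).2
          rw [eraseIdx_posIn hy0]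
          have hlen : (xs.erase y0).length = r := by
            rw [List.length_erase_of_mem hy0]; omega
          exact (ih hlen yr).mpr hyr
        · rw [getD_posIn 0 hy0]

theorem length_permutations {xs : List Int} {r : Nat} (h : xs.length = r) :
    (PySem.List.permutations xs r).length = Nat.factorial r := by
  induction r generalizing xs with
  | zero => rw [PySem.List.permutations.eq_def]; simp [Nat.factorial]
  | succ r ih =>
    rw [permutations_succ, List.length_flatMap,
      sum_map_const (List.range xs.length) _ (Nat.factorial r)
        (fun i hi => by
          have hlt : i < xs.length := List.mem_range.mp hi
          rw [List.length_map, ih (by rw [List.length_eraseIdx, if_pos hlt]; omega)])]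
    rw [List.length_range, h, Nat.factorial_succ]

theorem nodup_permutations {xs : List Int} {r : Nat} (h : xs.length = r) (hnd : xs.Nodup) :
    (PySem.List.permutations xs r).Nodup := by
  induction r generalizing xs with
  | zero => rw [PySem.List.permutations.eq_def]; simp
  | succ r ih =>
    rw [permutations_succ, List.flatMap_def, List.nodup_flatten]
    constructor
    · intro l hl
      simp only [List.mem_map, List.mem_range] at hl
      obtain ⟨i, hi, rfl⟩ := hl
      have hlen : (xs.eraseIdx i).length = r := by
        rw [List.length_eraseIdx, if_pos hi]; omega
      exact List.Nodup.map (fun t t' he => by injection he)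
        (ih hlen ((List.eraseIdx_sublist xs i).nodup hnd))
    · rw [List.pairwise_map]
      refine List.Pairwise.imp_of_mem ?_ (List.pairwise_lt_range (n := xs.length))
      intro a b ha hb hab y hy1 hy2
      have ha' : a < xs.length := List.mem_range.mp ha
      have hb' : b < xs.length := List.mem_range.mp hb
      simp only [List.mem_map] at hy1 hy2
      obtain ⟨t1, -, rfl⟩ := hy1
      obtain ⟨t2, -, he⟩ := hy2
      injection he with h1 h2
      rw [List.getD_eq_getElem _ _ hb', List.getD_eq_getElem _ _ ha'] at h1
      exact absurd ((List.Nodup.getElem_inj_iff hnd).mp h1) (by omega)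

theorem factB_natCast (k : Nat) : factB (k : Int) = (Nat.factorial k : Int) := by
  induction k with
  | zero => simp [factB, Nat.factorial]
  | succ m ih =>
    rw [factB]
    have h1 : ¬((m + 1 : Nat) : Int) ≤ 0 := by push_cast; omega
    rw [if_neg h1]
    have : ((m + 1 : Nat) : Int) - 1 = (m : Int) := by push_cast; ring
    rw [this, ih, Nat.factorial_succ]
    push_cast; ring

theorem posIn_eq_countP {x0 : Int} {L : List Int} (hs : L.Pairwise (· < ·)) (h : x0 ∈ L) :
    posIn x0 L = L.countP (fun y => decide (y < x0)) := by
  induction L with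
  | nil => simp at h
  | cons a t ih =>
    rcases List.pairwise_cons.mp hs with ⟨ha, ht⟩
    by_cases hax : a = x0
    · subst hax
      have : t.countP (fun y => decide (y < a)) = 0 := by
        rw [List.countP_eq_zero]
        intro y hy
        simpa using not_lt_of_gt (ha y hy)
      simp [posIn, this]
    · have hx : x0 ∈ t := (List.mem_cons.mp h).resolve_left (fun he => hax he.symm)
      have hax' : a < x0 := ha x0 hx
      simp only [posIn, if_neg hax, List.countP_cons, ih ht hx]
      simp [hax']

-- the heart: the index of x among the permutations is its Lehmer-code rank
theorem posIn_permutations {r : Nat} : ∀ {L x : List Int}, L.length = r → L.Nodup →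
    L.Pairwise (· < ·) → x.Perm L →
    (posIn x (PySem.List.permutations L r) : Int) = rankB x := by
  induction r with
  | zero =>
    intro L x h hnd hs hp
    have hL : L = [] := List.length_eq_zero_iff.mp h
    subst hL
    have hx : x = [] := List.perm_nil.mp hp
    subst hx
    rw [PySem.List.permutations.eq_def]
    simp [posIn, rankB]
  | succ r ih =>
    intro L x h hnd hs hp
    match x with
    | [] => exact absurd hp.length_eq (by simp [h])
    | x0 :: xr =>
      have hx0 : x0 ∈ L := hp.subset List.mem_cons_self
      have hjlt : posIn x0 L < L.length := posIn_lt_length hx0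
      have hxr : xr.Perm (L.erase x0) := (List.cons_perm_iff_perm_erase.mp hp).2
      have herase : L.eraseIdx (posIn x0 L) = L.erase x0 := eraseIdx_posIn hx0
      have hlenE : (L.erase x0).length = r := by
        rw [List.length_erase_of_mem hx0]; omega
      obtain ⟨M2, hM⟩ := range_split hjlt
      have hg : L.getD (posIn x0 L) 0 = x0 := getD_posIn 0 hx0
      have key := posIn_flatMap_append (j0 := posIn x0 L) (List.range (posIn x0 L)) M2
        (fun i => PySem.List.permutations (L.eraseIdx i) r) (fun i => L.getD i 0) x0 xr
        (fun i hi => by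
          have hi' : i < posIn x0 L := List.mem_range.mp hi
          have hilt : i < L.length := by omega
          show L.getD i 0 ≠ x0
          rw [List.getD_eq_getElem _ _ hilt]
          intro he
          have hgj : L[posIn x0 L]'hjlt = x0 := by
            rw [← List.getD_eq_getElem _ _ hjlt]; exact hg
          have : i = posIn x0 L := (List.Nodup.getElem_inj_iff hnd).mp (he.trans hgj.symm)
          omega)
        hg
        (by
          show xr ∈ PySem.List.permutations (L.eraseIdx (posIn x0 L)) r
          rw [herase]
          exact (mem_permutations_iff hlenE xr).mpr hxr)
      rw [permutations_succ, hM, key]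
      dsimp only
      rw [sum_map_const _ _ (Nat.factorial r) (fun i hi => by
          have hi' : i < posIn x0 L := List.mem_range.mp hi
          exact length_permutations
            (by rw [List.length_eraseIdx, if_pos (by omega)]; omega)),
        List.length_range, herase]
      have hIH : (posIn xr (PySem.List.permutations (L.erase x0) r) : Int) = rankB xr :=
        ih hlenE (hnd.erase x0) (hs.sublist List.erase_sublist) hxr
      have hcount : xr.countP (fun y => decide (y < x0)) = posIn x0 L := by
        have h1 : posIn x0 L = L.countP (fun y => decide (y < x0)) := posIn_eq_countP hs hx0
        have h2 : (x0 :: xr).countP (fun y => decide (y < x0)) =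
            L.countP (fun y => decide (y < x0)) := hp.countP_eq _
        rw [List.countP_cons] at h2
        simp at h2
        omega
      have hlenxr : xr.length = r := by
        have := hxr.length_eq
        omega
      rw [rankB, hcount, hlenxr, factB_natCast]
      push_cast
      rw [hIH]

-- characterisation of A's loop on a duplicate-free list, p ≠ q
theorem loopA_char {p q : List Int} (hpq : p ≠ q) :
    ∀ (l : List (List Int)), l.Nodup → ∀ (c ans : Int),
    loopA p q l c ans =
      if p ∈ l then
        if q ∈ l then |(posIn p l : Int) - (posIn q l : Int)| + ans
        else (c + (posIn p l : Int)) - ans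
      else if q ∈ l then (c + (posIn q l : Int)) - ans
      else ans := by
  intro l
  induction l with
  | nil => intro _ c ans; simp [loopA]
  | cons x rest ih =>
    intro hnd c ans
    obtain ⟨hxr, hnd'⟩ := List.nodup_cons.mp hnd
    by_cases hxp : x = p
    · have hxq : ¬(x = q) := fun he => hpq (hxp.symm.trans he)
      have hpr : p ∉ rest := hxp ▸ hxr
      rw [loopA, if_neg (fun hand => hxq hand.2), if_pos (Or.inl hxp), ih hnd' (c + 1) (c - ans)]
      have hmemp : p ∈ x :: rest := List.mem_cons.mpr (Or.inl hxp.symm)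
      have e1 : posIn p (x :: rest) = 0 := by simp [posIn, hxp]
      by_cases hqr : q ∈ rest
      · have e2 : posIn q (x :: rest) = posIn q rest + 1 := by simp [posIn, hxq]
        rw [if_neg hpr, if_pos hqr, if_pos hmemp, if_pos (List.mem_cons.mpr (Or.inr hqr)), e1, e2]
        push_cast
        rw [zero_sub, abs_neg, abs_of_nonneg (by positivity)]
        ring
      · have hqm : q ∉ x :: rest := fun hm => (List.mem_cons.mp hm).elim (fun he => hxq he.symm) hqr
        rw [if_neg hpr, if_neg hqr, if_pos hmemp, if_neg hqm, e1]
        push_cast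
        ring
    · by_cases hxq : x = q
      · have hqr : q ∉ rest := hxq ▸ hxr
        rw [loopA, if_neg (fun hand => hxp hand.1), if_pos (Or.inr hxq), ih hnd' (c + 1) (c - ans)]
        have hmemq : q ∈ x :: rest := List.mem_cons.mpr (Or.inl hxq.symm)
        have e1 : posIn q (x :: rest) = 0 := by simp [posIn, hxq]
        by_cases hpr : p ∈ rest
        · have e2 : posIn p (x :: rest) = posIn p rest + 1 := by simp [posIn, hxp]
          rw [if_pos hpr, if_neg hqr, if_pos (List.mem_cons.mpr (Or.inr hpr)), if_pos hmemq, e1, e2]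
          push_cast
          rw [sub_zero, abs_of_nonneg (by positivity)]
          ring
        · have hpm : p ∉ x :: rest := fun hm => (List.mem_cons.mp hm).elim (fun he => hxp he.symm) hpr
          rw [if_neg hpr, if_neg hqr, if_neg hpm, if_pos hmemq, e1]
          push_cast
          ring
      · rw [loopA, if_neg (fun hand => hxp hand.1), if_neg (fun hor => hor.elim hxp hxq),
          ih hnd' (c + 1) ans]
        have e1 : posIn p (x :: rest) = posIn p rest + 1 := by simp [posIn, hxp]
        have e2 : posIn q (x :: rest) = posIn q rest + 1 := by simp [posIn, hxq]
        have m1 : (p ∈ x :: rest) ↔ (p ∈ rest) := by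
          simp [List.mem_cons]; intro he; exact absurd he.symm hxp
        have m2 : (q ∈ x :: rest) ↔ (q ∈ rest) := by
          simp [List.mem_cons]; intro he; exact absurd he.symm hxq
        by_cases hpr : p ∈ rest
        · by_cases hqr : q ∈ rest
          · rw [if_pos hpr, if_pos hqr, if_pos (m1.mpr hpr), if_pos (m2.mpr hqr), e1, e2]
            have : ((posIn p rest + 1 : Nat) : Int) - ((posIn q rest + 1 : Nat) : Int)
                = ((posIn p rest : Nat) : Int) - ((posIn q rest : Nat) : Int) := by push_cast; ring
            rw [this]
          · rw [if_pos hpr, if_neg hqr, if_pos (m1.mpr hpr), if_neg (fun hm => hqr (m2.mp hm)), e1]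
            push_cast
            ring
        · by_cases hqr : q ∈ rest
          · rw [if_neg hpr, if_pos hqr, if_neg (fun hm => hpr (m1.mp hm)), if_pos (m2.mpr hqr), e2]
            push_cast
            ring
          · rw [if_neg hpr, if_neg hqr, if_neg (fun hm => hpr (m1.mp hm)),
              if_neg (fun hm => hqr (m2.mp hm))]

theorem loopA_self (p : List Int) : ∀ (l : List (List Int)) (c : Int), loopA p p l c 0 = 0 := by
  intro l
  induction l with
  | nil => intro c; simp [loopA]
  | cons x rest ih =>
    intro c
    by_cases hx : x = p
    · simp [loopA, hx]
    · simp [loopA, hx, ih]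

theorem sorted_guard_iff (n : Int) (xs : List Int) :
    PySem.List.sorted xs (fun y => y) false = PySem.List.pyRange 1 (n + 1) 1 ↔
      xs.Perm (PySem.List.pyRange 1 (n + 1) 1) := by
  constructor
  · intro h
    exact (h ▸ PySem.List.sorted_perm xs (fun y => y) false).symm
  · intro h
    exact PySem.List.sorted_eq_of_perm_of_pairwise_lt xs _ _ h.symm
      (PySem.List.pairwise_lt_pyRange_one 1 (n + 1))

-- ===== VERDICT (by name: the statement is the Claim_ definition above) =====
theorem solve_spec : Claim_equal_solve := by
  unfold Claim_equal_solve
  intro n p q _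
  unfold Spec_solve solve solve_alt
  have hnd := PySem.List.nodup_pyRange_one 1 (n + 1)
  have hs := PySem.List.pairwise_lt_pyRange_one 1 (n + 1)
  by_cases hpq : p = q
  · subst hpq
    rw [loopA_self, sub_self, abs_zero]
  · rw [loopA_char hpq _ (nodup_permutations rfl hnd) 0 0]
    have hmp := mem_permutations_iff (xs := PySem.List.pyRange 1 (n + 1) 1) rfl p
    have hmq := mem_permutations_iff (xs := PySem.List.pyRange 1 (n + 1) 1) rfl q
    unfold rank0B
    by_cases hp : p.Perm (PySem.List.pyRange 1 (n + 1) 1)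
    · have rp := posIn_permutations rfl hnd hs hp
      rw [if_pos ((sorted_guard_iff n p).mpr hp), if_pos (hmp.mpr hp)]
      by_cases hq : q.Perm (PySem.List.pyRange 1 (n + 1) 1)
      · rw [if_pos ((sorted_guard_iff n q).mpr hq), if_pos (hmq.mpr hq), rp,
          posIn_permutations rfl hnd hs hq, add_zero]
      · rw [if_neg (fun h => hq ((sorted_guard_iff n q).mp h)),
          if_neg (fun h => hq (hmq.mp h)), rp, zero_add, sub_zero]
        exact (abs_of_nonneg (rp ▸ Int.natCast_nonneg _)).symm
    · rw [if_neg (fun h => hp ((sorted_guard_iff n p).mp h)), if_neg (fun h => hp (hmp.mp h))]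
      by_cases hq : q.Perm (PySem.List.pyRange 1 (n + 1) 1)
      · have rq := posIn_permutations rfl hnd hs hq
        rw [if_pos ((sorted_guard_iff n q).mpr hq), if_pos (hmq.mpr hq),
          rq, zero_add, sub_zero, zero_sub, abs_neg]
        exact (abs_of_nonneg (rq ▸ Int.natCast_nonneg _)).symm
      · rw [if_neg (fun h => hq ((sorted_guard_iff n q).mp h)), if_neg (fun h => hq (hmq.mp h)),
          sub_self, abs_zero]
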